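-- pv_equiv track=rewrite | github.com/volkir31/university | lab6/3_task.py | classify_test_set_list
-- ===== SOURCE A (Python) =====
-- def classify_test_set_list(test_set_list, classifier_list):
--     out_list = []
--     for item in test_set_list:
--         d_vote = 0
--         z_vote = 0
--         for i in range(2, len(item)):
--             for j in range(len(classifier_list)):
--                 if i - 2 == j:
--                     if classifier_list[j] < item[i]:
--                         z_vote += 1
--                     else:
--                         d_vote += 1
--                 else:
--                     continue
--         out_list.append((item[0], d_vote, z_vote, item[1]))
--     return out_list
-- ===== SOURCE B (Python) =====
-- def classify_test_set_list(test_set_list, classifier_list):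
--     out_list = []
--     for item in test_set_list:
--         pairs = list(zip(item[2:], classifier_list))
--         z_vote = sum(1 for v, c in pairs if c < v)
--         out_list.append((item[0], len(pairs) - z_vote, z_vote, item[1]))
--     return out_list
-- ===== Notes on version B (the rewrite author's own statement) =====
-- stated objective: simpler
-- what changed: Replaces the O(n*m) nested index-matching loops (for each value index i, scan all classifier indices j looking for j == i-2) with a single zip of item[2:] against classifier_list, counting only z_vote and deriving d_vote arithmetically as len(pairs) - z_vote.
import Mathlib
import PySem

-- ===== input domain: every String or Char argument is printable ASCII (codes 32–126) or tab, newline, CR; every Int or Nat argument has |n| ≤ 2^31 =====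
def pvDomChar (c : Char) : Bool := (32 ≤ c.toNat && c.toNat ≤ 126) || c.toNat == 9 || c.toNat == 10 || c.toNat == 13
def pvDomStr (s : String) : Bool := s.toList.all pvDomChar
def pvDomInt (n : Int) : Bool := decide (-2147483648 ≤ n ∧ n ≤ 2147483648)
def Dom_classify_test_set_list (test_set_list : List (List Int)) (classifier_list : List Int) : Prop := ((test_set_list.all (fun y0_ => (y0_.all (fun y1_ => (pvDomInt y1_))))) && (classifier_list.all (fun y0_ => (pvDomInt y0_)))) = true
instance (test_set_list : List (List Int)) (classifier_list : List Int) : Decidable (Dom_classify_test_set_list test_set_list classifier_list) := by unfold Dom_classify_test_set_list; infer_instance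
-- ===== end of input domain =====

-- B replaces A's nested index-matching loops by one zip pass that counts z_vote only and
-- derives d_vote as len(pairs) - z_vote (objective: simpler; also asymptotically fewer steps per item).

-- ===== PORT A =====
-- Literal port of A: outer loop over items, for i in range(2, len(item)), inner scan
-- for j in range(len(classifier_list)) acting only when i - 2 == j.
-- (pyGetD is used where Pre_ guarantees the index is in range: i, j are in range by the
-- loop bounds; item[0], item[1] are in range by Pre_.)
def classify_test_set_list (test_set_list : List (List Int)) (classifier_list : List Int) : List (Int × Int × Int × Int) :=
  test_set_list.foldl (fun out_list item =>
    let dz : Int × Int :=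
      (PySem.List.pyRange 2 (item.length : Int) 1).foldl (fun dz i =>
        (PySem.List.pyRange 0 (classifier_list.length : Int) 1).foldl (fun dz j =>
          if i - 2 = j then
            if PySem.List.pyGetD classifier_list j 0 < PySem.List.pyGetD item i 0 then
              (dz.1, dz.2 + 1)
            else
              (dz.1 + 1, dz.2)
          else dz) dz) ((0 : Int), (0 : Int))
    out_list ++ [(PySem.List.pyGetD item 0 0, dz.1, dz.2, PySem.List.pyGetD item 1 0)]) []

-- ===== PORT B =====
-- Port of Source B: pairs = zip(item[2:], classifier_list); z = count of pairs with c < v;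
-- d = len(pairs) - z.  (sum(1 for … if p) is ported as countP.)
def classify_test_set_list_alt (test_set_list : List (List Int)) (classifier_list : List Int) : List (Int × Int × Int × Int) :=
  test_set_list.foldl (fun out_list item =>
    let pairs := (PySem.List.slice item (some 2) none).zip classifier_list
    let z : Int := (pairs.countP (fun p => p.2 < p.1) : Int)
    out_list ++ [(PySem.List.pyGetD item 0 0, (pairs.length : Int) - z, z, PySem.List.pyGetD item 1 0)]) []

-- ===== PRECONDITION & SPEC =====
-- Pre_ excludes exactly the inputs where A raises IndexError: an item with fewer than
-- 2 elements makes item[0] or item[1] raise (B raises there too).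
def Pre_classify_test_set_list (test_set_list : List (List Int)) (classifier_list : List Int) : Prop :=
  ∀ item ∈ test_set_list, 2 ≤ item.length
instance (test_set_list : List (List Int)) (classifier_list : List Int) : Decidable (Pre_classify_test_set_list test_set_list classifier_list) := by unfold Pre_classify_test_set_list; infer_instance

def pvWitness_classify_test_set_list : List (List Int) × List Int := ([[1, 2, 3, 0], [7, 8]], [2, 10])

def Spec_classify_test_set_list (test_set_list : List (List Int)) (classifier_list : List Int) (out : List (Int × Int × Int × Int)) : Prop := out = classify_test_set_list_alt test_set_list classifier_list
instance (test_set_list : List (List Int)) (classifier_list : List Int) (out : List (Int × Int × Int × Int)) : Decidable (Spec_classify_test_set_list test_set_list classifier_list out) := by unfold Spec_classify_test_set_list; infer_instance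

-- ===== CLAIM (what is proved, stated in full; the proofs are below) =====
def Claim_equal_classify_test_set_list : Prop := ∀ (test_set_list : List (List Int)) (classifier_list : List Int), Dom_classify_test_set_list test_set_list classifier_list → Pre_classify_test_set_list test_set_list classifier_list → Spec_classify_test_set_list test_set_list classifier_list (classify_test_set_list test_set_list classifier_list)

-- ===== LEMMAS AND PROOFS =====

-- A's inner j-loop fires exactly once, at j = i - 2 (if that is a valid classifier index).
theorem foldl_single_hit {α : Type} (g : α → α) (t : Int) :
    ∀ (a b : Int) (x : α),
      (PySem.List.pyRange a b 1).foldl (fun acc j => if t = j then g acc else acc) x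
        = if a ≤ t ∧ t < b then g x else x := by
  intro a b x
  by_cases hab : b ≤ a
  · rw [PySem.List.pyRange_one_eq_nil hab]
    simp only [List.foldl_nil]
    rw [if_neg (by omega)]
  · push_neg at hab
    have hm : ((b - a).toNat ≠ 0) := by omega
    induction hn : (b - a).toNat generalizing a x with
    | zero => omega
    | succ n ih =>
      rw [PySem.List.pyRange_one_cons hab]
      simp only [List.foldl_cons]
      by_cases hta : t = a
      · subst hta
        rw [if_pos rfl]
        by_cases hb : t + 1 < b
        · rw [ih (t + 1) (g x) hb (by omega) (by omega)]
          rw [if_neg (by omega), if_pos (by omega)]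
        · rw [PySem.List.pyRange_one_eq_nil (by omega)]
          simp only [List.foldl_nil]
          rw [if_pos (by omega)]
      · rw [if_neg hta]
        by_cases hb : a + 1 < b
        · rw [ih (a + 1) x hb (by omega) (by omega)]
          split_ifs with h1 h2 <;> first | rfl | omega
        · rw [PySem.List.pyRange_one_eq_nil (by omega)]
          simp only [List.foldl_nil]
          rw [if_neg (by omega)]

-- Vote totals of the paired tail, as computed pair by pair (used as the loop invariant value).
def pvVotes : List Int → List Int → Int × Int
  | v :: vs, c :: cs =>
      let p := pvVotes vs cs
      if c < v then (p.1, p.2 + 1) else (p.1 + 1, p.2)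
  | _, _ => (0, 0)

theorem pvVotes_nil_right (vs : List Int) : pvVotes vs [] = (0, 0) := by
  cases vs <;> rfl

theorem pvVotes_nil_left (cs : List Int) : pvVotes [] cs = (0, 0) := by
  cases cs <;> rfl

-- pvVotes agrees with B's (len - count, count) on the zip.
theorem pvVotes_eq_zip (vs cs : List Int) :
    pvVotes vs cs =
      (((vs.zip cs).length : Int) - ((vs.zip cs).countP (fun p => p.2 < p.1) : Int),
       ((vs.zip cs).countP (fun p => p.2 < p.1) : Int)) := by
  induction vs generalizing cs with
  | nil => cases cs <;> simp [pvVotes]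
  | cons v vs ih =>
    cases cs with
    | nil => simp [pvVotes]
    | cons c cs =>
      simp only [pvVotes, ih, List.zip_cons_cons, List.length_cons, List.countP_cons]
      by_cases h : c < v <;> simp [h, Prod.ext_iff] <;> push_cast <;> omega

-- A's i-loop starting at index 2 + k accumulates exactly pvVotes of the dropped tails.
theorem loopA_eq (item classifier_list : List Int) :
    ∀ (k : Nat) (d z : Int),
      (PySem.List.pyRange ((2 + k : Nat) : Int) (item.length : Int) 1).foldl (fun dz i =>
          (PySem.List.pyRange 0 (classifier_list.length : Int) 1).foldl (fun dz j =>
            if i - 2 = j then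
              if PySem.List.pyGetD classifier_list j 0 < PySem.List.pyGetD item i 0 then
                (dz.1, dz.2 + 1)
              else
                (dz.1 + 1, dz.2)
            else dz) dz) (d, z)
        = (d + (pvVotes (item.drop (2 + k)) (classifier_list.drop k)).1,
           z + (pvVotes (item.drop (2 + k)) (classifier_list.drop k)).2) := by
  intro k d z
  by_cases hend : item.length ≤ 2 + k
  · rw [PySem.List.pyRange_one_eq_nil (a := ((2 + k : Nat) : Int)) (b := (item.length : Int))
      (by exact_mod_cast hend)]
    rw [List.drop_eq_nil_of_le hend]
    simp [pvVotes]
  · push_neg at hend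
    induction hn : item.length - (2 + k) generalizing k d z with
    | zero => omega
    | succ n ih =>
      rw [PySem.List.pyRange_one_cons (a := ((2 + k : Nat) : Int)) (b := (item.length : Int))
        (by exact_mod_cast hend)]
      simp only [List.foldl_cons]
      have hhit := foldl_single_hit
        (fun dz : Int × Int =>
          if PySem.List.pyGetD classifier_list (((2 + k : Nat) : Int) - 2) 0
              < PySem.List.pyGetD item ((2 + k : Nat) : Int) 0 then
            (dz.1, dz.2 + 1)
          else (dz.1 + 1, dz.2))
        (((2 + k : Nat) : Int) - 2) 0 (classifier_list.length : Int) (d, z)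
      -- the inner fold's step matches the single-hit shape (the comparison at j = i-2)
      have hstep :
          (PySem.List.pyRange 0 (classifier_list.length : Int) 1).foldl (fun dz j =>
            if ((2 + k : Nat) : Int) - 2 = j then
              if PySem.List.pyGetD classifier_list j 0
                  < PySem.List.pyGetD item ((2 + k : Nat) : Int) 0 then
                (dz.1, dz.2 + 1)
              else (dz.1 + 1, dz.2)
            else dz) (d, z)
          = if (0 : Int) ≤ ((2 + k : Nat) : Int) - 2 ∧
                ((2 + k : Nat) : Int) - 2 < (classifier_list.length : Int) then
              (if PySem.List.pyGetD classifier_list (((2 + k : Nat) : Int) - 2) 0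
                  < PySem.List.pyGetD item ((2 + k : Nat) : Int) 0 then
                (d, z + 1)
              else (d + 1, z))
            else (d, z) := by
        rw [← hhit]
        apply PySem.List.foldl_congr_mem
        intro acc j _
        by_cases hj : ((2 + k : Nat) : Int) - 2 = j
        · subst hj; simp
        · rw [if_neg hj, if_neg hj]
      rw [hstep]
      have hitem : item.drop (2 + k) = item[2 + k] :: item.drop (2 + k + 1) :=
        List.drop_eq_getElem_cons hend
      have hgi : PySem.List.pyGetD item ((2 + k : Nat) : Int) 0 = item[2 + k] := by
        rw [PySem.List.pyGetD_natCast]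
        exact List.getD_eq_getElem item 0 hend
      have hcast : ((2 + (k + 1) : Nat) : Int) = ((2 + k : Nat) : Int) + 1 := by push_cast; ring
      by_cases hcl : k < classifier_list.length
      · have hcs : classifier_list.drop k = classifier_list[k] :: classifier_list.drop (k + 1) :=
          List.drop_eq_getElem_cons hcl
        have hgc : PySem.List.pyGetD classifier_list (((2 + k : Nat) : Int) - 2) 0
            = classifier_list[k] := by
          rw [show (((2 + k : Nat) : Int) - 2) = ((k : Nat) : Int) by push_cast; ring]
          rw [PySem.List.pyGetD_natCast]
          exact List.getD_eq_getElem classifier_list 0 hcl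
        rw [if_pos (by push_cast; omega), hgc, hgi]
        rw [hitem, hcs]
        simp only [pvVotes]
        by_cases hlt : classifier_list[k] < item[2 + k]
        · rw [if_pos hlt, if_pos hlt]
          by_cases hend2 : item.length ≤ 2 + (k + 1)
          · rw [PySem.List.pyRange_one_eq_nil (a := ((2 + k : Nat) : Int) + 1)
              (b := (item.length : Int)) (by push_cast; omega)]
            have hd : item.drop (2 + k + 1) = [] := List.drop_eq_nil_of_le (by omega)
            rw [hd, pvVotes_nil_left]
            simp
          · push_neg at hend2
            have := ih (k + 1) d (z + 1) hend2 (by omega)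
            rw [hcast] at this
            rw [show 2 + (k + 1) = 2 + k + 1 from rfl] at this
            rw [this]
            simp [Prod.ext_iff]
            all_goals omega
        · rw [if_neg hlt, if_neg hlt]
          by_cases hend2 : item.length ≤ 2 + (k + 1)
          · rw [PySem.List.pyRange_one_eq_nil (a := ((2 + k : Nat) : Int) + 1)
              (b := (item.length : Int)) (by push_cast; omega)]
            have hd : item.drop (2 + k + 1) = [] := List.drop_eq_nil_of_le (by omega)
            rw [hd, pvVotes_nil_left]
            simp
          · push_neg at hend2
            have := ih (k + 1) (d + 1) z hend2 (by omega)
            rw [hcast] at this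
            rw [show 2 + (k + 1) = 2 + k + 1 from rfl] at this
            rw [this]
            simp [Prod.ext_iff]
            all_goals omega
      · -- classifier exhausted: the head contributes nothing and both cl-drops are []
        rw [if_neg (by push_cast; omega)]
        have hc0 : classifier_list.drop k = [] := List.drop_eq_nil_of_le (by omega)
        have hc1 : classifier_list.drop (k + 1) = [] := List.drop_eq_nil_of_le (by omega)
        by_cases hend2 : item.length ≤ 2 + (k + 1)
        · rw [PySem.List.pyRange_one_eq_nil (a := ((2 + k : Nat) : Int) + 1)
            (b := (item.length : Int)) (by push_cast; omega)]
          rw [hc0, pvVotes_nil_right]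
          simp
        · push_neg at hend2
          have := ih (k + 1) d z hend2 (by omega)
          rw [hcast] at this
          rw [this, hc0, hc1, pvVotes_nil_right, pvVotes_nil_right]

-- ===== VERDICT (by name: the statement is the Claim_ definition above) =====
theorem classify_test_set_list_spec : Claim_equal_classify_test_set_list := by
  intro ts cl _ _
  unfold Spec_classify_test_set_list classify_test_set_list classify_test_set_list_alt
  rw [PySem.List.foldl_append_singleton_eq_map, PySem.List.foldl_append_singleton_eq_map]
  apply List.map_congr_left
  intro item _
  have hsl : PySem.List.slice item (some 2) none = item.drop 2 := by simp [pysem]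
  have h := loopA_eq item cl 0 0 0
  simp only [Nat.add_zero, List.drop_zero] at h
  rw [show ((2 : Nat) : Int) = (2 : Int) by norm_num] at h
  rw [h, pvVotes_eq_zip, hsl]
  norm_num
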